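-- pv_equiv track=rewrite | github.com/shravanasati/advent-of-code | 2025/day6/b.py | chunk_columns
-- ===== SOURCE A (Python) =====
-- def chunk_columns(columns):
--     """Yield contiguous non-empty column groups, splitting on all-space columns."""
--     current = []
--     for column in columns:
--         if all(char == " " for char in column):
--             if current:
--                 yield current
--                 current = []
--             continue
--         current.append(column)
--     if current:
--         yield current
-- ===== SOURCE B (Python) =====
-- def chunk_columns(columns):
--     """Yield contiguous non-empty column groups, splitting on all-space columns."""
--     def is_blank(col):
--         return all(ch == " " for ch in col)
--     n = len(columns)
--     i = 0
--     while i < n: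
--         if is_blank(columns[i]):
--             i += 1
--         else:
--             j = i
--             while j < n and not is_blank(columns[j]):
--                 j += 1
--             yield columns[i:j]
--             i = j
-- ===== Notes on version B (the rewrite author's own statement) =====
-- stated objective: alternative
-- what changed: Replaces A's accumulator-with-flush loop (append to current, flush on blank and at the end) by run extraction: skip blank columns, and for each non-blank head take the whole non-blank run at once and yield it.
import Mathlib
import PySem

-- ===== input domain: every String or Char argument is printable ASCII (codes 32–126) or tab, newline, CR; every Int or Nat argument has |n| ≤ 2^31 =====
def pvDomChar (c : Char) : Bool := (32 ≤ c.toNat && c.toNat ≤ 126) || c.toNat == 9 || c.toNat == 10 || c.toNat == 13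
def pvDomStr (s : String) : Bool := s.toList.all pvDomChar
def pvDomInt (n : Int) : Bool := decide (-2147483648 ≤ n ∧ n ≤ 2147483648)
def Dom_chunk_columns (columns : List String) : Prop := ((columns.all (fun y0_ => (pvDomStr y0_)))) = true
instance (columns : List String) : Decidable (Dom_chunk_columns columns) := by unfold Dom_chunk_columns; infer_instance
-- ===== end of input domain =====

-- B replaces A's accumulator-with-flush loop by run extraction (skip blank columns,
-- take each non-blank run whole); structurally different, same cost (objective: alternative).

-- ===== PORT A =====
-- all(char == " " for char in column)
def pvBlankA (column : String) : Bool := column.toList.all (fun ch => ch == ' ')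

-- A's for-loop as structural recursion over (current, remaining columns);
-- yielded groups are accumulated front-to-back, with the final flush at [].
def pvGoA (current : List String) : List String → List (List String)
  | [] => if current ≠ [] then [current] else []
  | column :: rest =>
      if pvBlankA column then
        if current ≠ [] then current :: pvGoA [] rest else pvGoA current rest
      else pvGoA (current ++ [column]) rest

def chunk_columns (columns : List String) : List (List String) := pvGoA [] columns

-- ===== PORT B =====
def pvBlankB (col : String) : Bool := col.toList.all (fun ch => ch == ' ')

-- B's outer while-loop, with the index i represented by the suffix columns[i:];
-- the inner while advancing j over the non-blank run and the slice columns[i:j]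
-- are exactly takeWhile / dropWhile on (not blank) over that suffix.
def pvGoB : List String → List (List String)
  | [] => []
  | c :: rest =>
      if pvBlankB c then pvGoB rest
      else
        (c :: rest).takeWhile (fun s => !pvBlankB s)
          :: pvGoB ((c :: rest).dropWhile (fun s => !pvBlankB s))
termination_by l => l.length
decreasing_by
  · simp
  · rename_i h
    have he : List.dropWhile (fun s => !pvBlankB s) (c :: rest)
        = List.dropWhile (fun s => !pvBlankB s) rest := by
      simp [h]
    rw [he]
    exact Nat.lt_succ_of_le (List.length_dropWhile_le _ _)

def chunk_columns_alt (columns : List String) : List (List String) := pvGoB columns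

-- ===== PRECONDITION & SPEC =====
def Spec_chunk_columns (columns : List String) (out : List (List String)) : Prop := out = chunk_columns_alt columns
instance (columns : List String) (out : List (List String)) : Decidable (Spec_chunk_columns columns out) := by unfold Spec_chunk_columns; infer_instance

-- ===== CLAIM (what is proved, stated in full; the proofs are below) =====
def Claim_equal_chunk_columns : Prop := ∀ (columns : List String), Dom_chunk_columns columns → Spec_chunk_columns columns (chunk_columns columns)

-- ===== LEMMAS AND PROOFS =====

theorem pvGoB_nil : pvGoB [] = [] := by simp [pvGoB]

theorem pvGoB_cons (c : String) (t : List String) :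
    pvGoB (c :: t) = if pvBlankB c then pvGoB t
      else (c :: t).takeWhile (fun s => !pvBlankB s)
        :: pvGoB ((c :: t).dropWhile (fun s => !pvBlankB s)) := by
  rw [pvGoB.eq_def]

-- A's state (current, cols) versus B: a nonempty `current` is the already-read prefix
-- of the group B will emit next.
theorem pvGoA_eq (cols : List String) : ∀ (cur : List String),
    pvGoA cur cols =
      if cur = [] then pvGoB cols
      else (cur ++ cols.takeWhile (fun s => !pvBlankB s))
             :: pvGoB (cols.dropWhile (fun s => !pvBlankB s)) := by
  induction cols with
  | nil =>
    intro cur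
    by_cases h : cur = [] <;> simp [pvGoA, pvGoB_nil, h]
  | cons c t ih =>
    intro cur
    by_cases hb : pvBlankA c
    · have hb' : pvBlankB c := hb
      by_cases h : cur = [] <;>
        simp [pvGoA, pvGoB_cons, h, hb, hb', ih, List.takeWhile, List.dropWhile]
    · have hb' : ¬ pvBlankB c := hb
      have hne : cur ++ [c] ≠ [] := by simp
      by_cases h : cur = [] <;>
        simp [pvGoA, pvGoB_cons, h, hb, hb', ih, hne, List.takeWhile, List.dropWhile]

-- ===== VERDICT (by name: the statement is the Claim_ definition above) =====
theorem chunk_columns_spec : Claim_equal_chunk_columns := by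
  intro columns _
  unfold Spec_chunk_columns chunk_columns chunk_columns_alt
  simp [pvGoA_eq]
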